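-- pv_equiv track=rewrite | github.com/WaiHouer/Algorithm_Space | 决策优化课程作业/牛顿法.py | function_deal
-- ===== SOURCE A (Python) =====
-- def function_deal(function, tag):  # 函数：对输入进行标准化处理
--     function = function.replace('=', '')
--     function = function.replace('(', '')
--     function = function.replace(')', '')
--     function = function.replace('^', '**')
--     if tag == 'min':
--         function = function.replace('min', '')
--     elif tag == 'max':
--         function = function.replace('max', '')  # 如果是最大化问题，全都取负数
--         negative = 0
--         function = list(function)
--         for i in range(len(function)):
--             if (i == 0) and (function[i] == '-'): function[i] = ''
--             elif (i == 0) and (function[i] != '-'): negative = 1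
--             elif function[i] == '+': function[i] = '-'
--             elif function[i] == '-': function[i] = '+'
--         if negative == 1:
--             function = '-' + ''.join(function)
--         else:
--             function = ''.join(function)
--     return function
-- ===== SOURCE B (Python) =====
-- def function_deal(function, tag):
--     f = function.replace('=', '').replace('(', '').replace(')', '').replace('^', '**')
--     if tag == 'min':
--         return f.replace('min', '')
--     if tag == 'max':
--         f = f.replace('max', '')
--         if not f:
--             return f
--         # flip every sign in f[1:] by splitting on '+', turning '-' into '+'
--         # inside each piece, and rejoining the pieces with '-'
--         swapped = '-'.join(p.replace('-', '+') for p in f[1:].split('+'))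
--         return swapped if f[0] == '-' else '-' + f[0] + swapped
--     return f
-- ===== Notes on version B (the rewrite author's own statement) =====
-- stated objective: alternative
-- what changed: Replaces A's index loop over a mutable char list (with its i==0 special cases and 'negative' flag) by a split/map/join pipeline: split f[1:] on '+', turn '-' into '+' inside each piece, rejoin the pieces with '-', plus a three-way split on the first character.
import Mathlib
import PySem

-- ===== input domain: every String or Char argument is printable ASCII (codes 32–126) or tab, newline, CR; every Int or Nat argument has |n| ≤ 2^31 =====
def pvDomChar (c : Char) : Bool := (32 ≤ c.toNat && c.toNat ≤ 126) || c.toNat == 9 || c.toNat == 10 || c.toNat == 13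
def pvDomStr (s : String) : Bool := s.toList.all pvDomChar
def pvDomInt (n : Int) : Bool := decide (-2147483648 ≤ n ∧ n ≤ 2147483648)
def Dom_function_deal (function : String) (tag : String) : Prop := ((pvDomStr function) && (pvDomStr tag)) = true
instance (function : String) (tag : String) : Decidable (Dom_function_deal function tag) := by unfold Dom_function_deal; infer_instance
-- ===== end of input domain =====

-- B replaces A's index loop over a mutable char list (with its i == 0 special cases and
-- 'negative' flag) by a split-on-'+' / per-piece '-'→'+' replace / join-with-'-' pipeline
-- over f[1:] plus a split on the first character (objective: simpler).

-- ===== PORT A =====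
-- A's for-loop over range(len(function)) mutating the char list in place: the state is the
-- index i, the 'negative' flag and the list of (possibly emptied/replaced) one-char strings.
def pvLoopA : Nat → List Char → Int → List String → Int × List String
  | _, [], neg, out => (neg, out)
  | i, c :: rest, neg, out =>
    if i == 0 && c == '-' then pvLoopA (i+1) rest neg (out ++ [""])
    else if i == 0 then pvLoopA (i+1) rest 1 (out ++ [String.ofList [c]])
    else if c == '+' then pvLoopA (i+1) rest neg (out ++ ["-"])
    else if c == '-' then pvLoopA (i+1) rest neg (out ++ ["+"])
    else pvLoopA (i+1) rest neg (out ++ [String.ofList [c]])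

def function_deal (function : String) (tag : String) : String :=
  let f := PySem.Str.replace (PySem.Str.replace (PySem.Str.replace (PySem.Str.replace function "=" "") "(" "") ")" "") "^" "**"
  if tag == "min" then PySem.Str.replace f "min" ""
  else if tag == "max" then
    let g := PySem.Str.replace f "max" ""
    let r := pvLoopA 0 g.toList 0 []
    let joined := PySem.Str.join "" r.2
    if r.1 == 1 then "-" ++ joined else joined
  else f

-- ===== PORT B =====
-- Source B's max branch: '-'.join(p.replace('-','+') for p in f[1:].split('+')) and a
-- three-way split on the first character (exact on the whole domain).
def function_deal_alt (function : String) (tag : String) : String :=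
  let f := PySem.Str.replace (PySem.Str.replace (PySem.Str.replace (PySem.Str.replace function "=" "") "(" "") ")" "") "^" "**"
  if tag == "min" then PySem.Str.replace f "min" ""
  else if tag == "max" then
    let g := PySem.Str.replace f "max" ""
    let cs := g.toList
    if cs.isEmpty then g                                   -- 'if not f: return f'
    else
      -- '-'.join(p.replace('-','+') for p in f[1:].split('+'))
      let swapped := PySem.Chars.join ['-'] ((PySem.Chars.splitOn (PySem.List.slice cs (some 1) none) ['+']).map (fun p => PySem.Chars.replace p ['-'] ['+']))
      if cs.headD ' ' == '-' then String.ofList swapped    -- f[0] == '-'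
      else String.ofList ('-' :: cs.headD ' ' :: swapped)  -- '-' + f[0] + swapped
  else f

-- ===== PRECONDITION & SPEC =====
def Spec_function_deal (function : String) (tag : String) (out : String) : Prop := out = function_deal_alt function tag
instance (function : String) (tag : String) (out : String) : Decidable (Spec_function_deal function tag out) := by unfold Spec_function_deal; infer_instance

-- ===== CLAIM (what is proved, stated in full; the proofs are below) =====
def Claim_equal_function_deal : Prop := ∀ (function : String) (tag : String), Dom_function_deal function tag → Spec_function_deal function tag (function_deal function tag)

-- ===== LEMMAS AND PROOFS =====

-- the character-level effect of swapping signs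
def pvFlipChar (c : Char) : Char := if c == '+' then '-' else if c == '-' then '+' else c

-- ---- A side: the loop appends one-char strings ----
def pvFlipStr (c : Char) : String :=
  if c == '+' then "-" else if c == '-' then "+" else String.ofList [c]

theorem pvLoopA_tail (rest : List Char) : ∀ (i : Nat) (neg : Int) (out : List String),
    pvLoopA (i+1) rest neg out = (neg, out ++ rest.map pvFlipStr) := by
  induction rest with
  | nil => intro i neg out; simp [pvLoopA]
  | cons c cs ih =>
    intro i neg out
    simp only [pvLoopA]
    have h0 : ((i+1 : Nat) == 0) = false := by simp
    rw [h0]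
    by_cases hp : c = '+'
    · simp [hp, ih, pvFlipStr, List.append_assoc]
    · by_cases hm : c = '-'
      · simp [hm, ih, pvFlipStr, List.append_assoc]
      · simp [hp, hm, ih, pvFlipStr, List.append_assoc]

theorem pvLoopA_one (rest : List Char) (neg : Int) (out : List String) :
    pvLoopA 1 rest neg out = (neg, out ++ rest.map pvFlipStr) :=
  pvLoopA_tail rest 0 neg out

theorem pvFlipStr_toList (c : Char) : (pvFlipStr c).toList = [pvFlipChar c] := by
  unfold pvFlipStr pvFlipChar
  by_cases hp : c = '+' <;> by_cases hm : c = '-' <;> simp [hp, hm]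

theorem pvJoinNil (l : List (List Char)) : PySem.Chars.join [] l = l.flatten := by
  induction l with
  | nil => simp [PySem.Chars.join, List.intercalate]
  | cons x xs ih =>
    cases xs with
    | nil => simp [PySem.Chars.join, List.intercalate]
    | cons y ys =>
      simp only [PySem.Chars.join, List.intercalate] at *
      simp [List.intersperse] at *
      simpa using ih

theorem pvJoinFlip (pre : List String) (rest : List Char) :
    (PySem.Str.join "" (pre ++ rest.map pvFlipStr)).toList
      = (pre.map String.toList).flatten ++ rest.map pvFlipChar := by
  simp only [PySem.Str.join, String.toList_ofList]
  have h1 : (rest.map pvFlipStr).map String.toList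
      = (rest.map pvFlipChar).map (fun c => [c]) := by
    induction rest with
    | nil => simp
    | cons a t ih => simp [ih, pvFlipStr_toList]
  have h2 : ((rest.map pvFlipChar).map (fun c => [c])).flatten = rest.map pvFlipChar := by
    induction (rest.map pvFlipChar) with
    | nil => simp
    | cons a t ih => simp [ih]
  rw [show ("" : String).toList = [] from rfl, List.map_append, h1, pvJoinNil,
      List.flatten_append, h2]

-- ---- B side: replace, split, join ----
def pvRep (l : List Char) : List Char := l.map (fun c => if c == '-' then '+' else c)

theorem pvRepGo : ∀ (l : List Char) (fuel : Nat) (acc : List Char), l.length ≤ fuel →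
    PySem.Chars.replace.go ['-'] ['+'] fuel l acc = acc.reverse ++ pvRep l := by
  intro l
  induction l with
  | nil =>
    intro fuel acc _
    cases fuel <;> simp [PySem.Chars.replace.go, pvRep]
  | cons c t ih =>
    intro fuel acc h
    cases fuel with
    | zero => simp at h
    | succ f =>
      simp only [PySem.Chars.replace.go]
      by_cases hc : c = '-'
      · subst hc
        have hpre : List.isPrefixOf ['-'] ('-' :: t) = true := by simp [List.isPrefixOf]
        rw [if_pos hpre]
        simp only [List.length_cons, List.length_nil, List.drop_succ_cons, List.drop_zero]
        rw [ih f _ (by simpa using h)]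
        simp [pvRep]
      · have hpre : List.isPrefixOf ['-'] (c :: t) = false := by
          simp [List.isPrefixOf]; exact fun h' => hc h'.symm
        rw [if_neg (by simp [hpre])]
        rw [ih f _ (by simpa using h)]
        simp [pvRep, hc]

theorem pvReplaceEq (l : List Char) : PySem.Chars.replace l ['-'] ['+'] = pvRep l := by
  unfold PySem.Chars.replace
  rw [if_neg (by simp)]
  simpa using pvRepGo l l.length [] le_rfl

-- structural description of split-on-'+' with an already-read prefix
def pvSplitP : List Char → List Char → List (List Char)
  | pre, [] => [pre]
  | pre, c :: r => if c == '+' then pre :: pvSplitP [] r else pvSplitP (pre ++ [c]) r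

theorem pvSplitP_ne (l : List Char) : ∀ pre, pvSplitP pre l ≠ [] := by
  induction l with
  | nil => intro pre; simp [pvSplitP]
  | cons c r ih =>
    intro pre
    simp only [pvSplitP]
    by_cases hc : (c == '+') = true
    · rw [if_pos hc]; simp
    · rw [if_neg hc]; exact ih _

theorem pvSplitGo : ∀ (l : List Char) (fuel : Nat) (cur : List Char) (acc : List (List Char)),
    l.length ≤ fuel →
    PySem.Chars.splitOn.go ['+'] fuel l cur acc = acc.reverse ++ pvSplitP cur.reverse l := by
  intro l
  induction l with
  | nil =>
    intro fuel acc cur _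
    cases fuel <;> simp [PySem.Chars.splitOn.go, pvSplitP]
  | cons c t ih =>
    intro fuel cur acc h
    cases fuel with
    | zero => simp at h
    | succ f =>
      simp only [PySem.Chars.splitOn.go]
      by_cases hc : c = '+'
      · subst hc
        have hpre : List.isPrefixOf ['+'] ('+' :: t) = true := by simp [List.isPrefixOf]
        rw [if_pos hpre]
        simp only [List.length_cons, List.length_nil, List.drop_succ_cons, List.drop_zero]
        rw [ih f _ _ (by simpa using h)]
        simp [pvSplitP]
      · have hpre : List.isPrefixOf ['+'] (c :: t) = false := by
          simp [List.isPrefixOf]; exact fun h' => hc h'.symm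
        rw [if_neg (by simp [hpre])]
        rw [ih f _ _ (by simpa using h)]
        simp [pvSplitP, hc]

theorem pvSplitOnEq (l : List Char) : PySem.Chars.splitOn l ['+'] = pvSplitP [] l := by
  unfold PySem.Chars.splitOn
  rw [pvSplitGo l (l.length + 1) [] [] (by omega)]
  simp

theorem pvJoinSplit (l : List Char) : ∀ (pre : List Char),
    PySem.Chars.join ['-'] ((pvSplitP pre l).map (fun p => PySem.Chars.replace p ['-'] ['+']))
      = pvRep pre ++ l.map pvFlipChar := by
  induction l with
  | nil => intro pre; simp [pvSplitP, PySem.Chars.join_singleton, pvReplaceEq]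
  | cons c r ih =>
    intro pre
    simp only [pvSplitP]
    by_cases hc : c = '+'
    · subst hc
      rw [if_pos (by decide)]
      obtain ⟨q, t, hq⟩ := List.exists_cons_of_ne_nil (pvSplitP_ne r [])
      have := ih []
      rw [hq] at this ⊢
      simp only [List.map_cons, PySem.Chars.join_cons_cons]
      simp only [List.map_cons] at this
      rw [this]
      simp [pvReplaceEq, pvRep, pvFlipChar]
    · rw [if_neg (by simp [hc])]
      rw [ih (pre ++ [c])]
      simp [pvRep, pvFlipChar, hc]

theorem pvSliceTail (c : Char) (rest : List Char) :
    PySem.List.slice (c :: rest) (some 1) none = rest := by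
  simp [PySem.List.slice, PySem.List.clampIdx]

-- the two max-branch expressions agree for every intermediate string g
theorem pvMaxEq (g : String) :
    (let r := pvLoopA 0 g.toList 0 [];
     let joined := PySem.Str.join "" r.2;
     if r.1 == 1 then "-" ++ joined else joined)
    = (let cs := g.toList;
       if cs.isEmpty then g
       else
         let swapped := PySem.Chars.join ['-'] ((PySem.Chars.splitOn (PySem.List.slice cs (some 1) none) ['+']).map (fun p => PySem.Chars.replace p ['-'] ['+']));
         if cs.headD ' ' == '-' then String.ofList swapped
         else String.ofList ('-' :: cs.headD ' ' :: swapped)) := by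
  show (if (pvLoopA 0 g.toList 0 []).1 == 1
        then "-" ++ PySem.Str.join "" (pvLoopA 0 g.toList 0 []).2
        else PySem.Str.join "" (pvLoopA 0 g.toList 0 []).2) = _
  cases hg : g.toList with
  | nil =>
    have hg' : g = "" := String.toList_inj.mp (by simp [hg])
    subst hg'
    decide
  | cons c rest =>
    have hstep : pvLoopA 0 (c :: rest) 0 []
        = (if c == '-' then ((0 : Int), [""] ++ rest.map pvFlipStr)
           else ((1 : Int), [String.ofList [c]] ++ rest.map pvFlipStr)) := by
      by_cases hm : (c == '-') = true
      · simp [pvLoopA, hm, pvLoopA_one]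
      · simp [pvLoopA, hm, pvLoopA_one]
    rw [hstep]
    have hsw : PySem.Chars.join ['-'] ((PySem.Chars.splitOn (PySem.List.slice (c :: rest) (some 1) none) ['+']).map (fun p => PySem.Chars.replace p ['-'] ['+']))
        = rest.map pvFlipChar := by
      rw [pvSliceTail, pvSplitOnEq, pvJoinSplit]
      simp [pvRep]
    have hrhs : (if (c :: rest).isEmpty then g
       else
         let swapped := PySem.Chars.join ['-'] ((PySem.Chars.splitOn (PySem.List.slice (c :: rest) (some 1) none) ['+']).map (fun p => PySem.Chars.replace p ['-'] ['+']));
         if (c :: rest).headD ' ' == '-' then String.ofList swapped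
         else String.ofList ('-' :: (c :: rest).headD ' ' :: swapped))
        = (if c == '-' then String.ofList (rest.map pvFlipChar)
           else String.ofList ('-' :: c :: rest.map pvFlipChar)) := by
      rw [hsw]; rfl
    rw [hrhs]
    by_cases hm : (c == '-') = true
    · rw [if_pos hm]
      show (if ((0 : Int) == 1) = true then _ else _) = _
      rw [if_neg (by decide), if_pos hm]
      apply String.toList_inj.mp
      rw [pvJoinFlip [""] rest]
      simp
    · rw [if_neg hm]
      show (if ((1 : Int) == 1) = true then _ else _) = _
      rw [if_pos (by decide), if_neg hm]
      apply String.toList_inj.mp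
      rw [String.toList_append, pvJoinFlip [String.ofList [c]] rest]
      simp

-- ===== VERDICT (by name: the statement is the Claim_ definition above) =====
theorem function_deal_spec : Claim_equal_function_deal := by
  intro function tag _
  unfold Spec_function_deal function_deal function_deal_alt
  show (if tag == "min"
        then PySem.Str.replace (PySem.Str.replace (PySem.Str.replace (PySem.Str.replace (PySem.Str.replace function "=" "") "(" "") ")" "") "^" "**") "min" ""
        else _) = _
  generalize PySem.Str.replace (PySem.Str.replace (PySem.Str.replace (PySem.Str.replace function "=" "") "(" "") ")" "") "^" "**" = f
  by_cases h1 : (tag == "min") = true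
  · rw [if_pos h1, if_pos h1]
  · by_cases h2 : (tag == "max") = true
    · rw [if_neg h1, if_neg h1, if_pos h2, if_pos h2]
      exact pvMaxEq _
    · rw [if_neg h1, if_neg h1, if_neg h2, if_neg h2]
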